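-- pv_equiv track=rewrite | github.com/liangtaohy/LotusStorm | tf/bayes.py | document_features
-- ===== SOURCE A (Python) =====
-- def document_features(data, word_bag):
--     """
--     labeled_featuresets: A list of classified featuresets,
--     i.e., a list of tuples ``(featureset, label)``.
--     """
--     feature = {}
--     tokens = set(data)
--     for w in word_bag:
--         if w in tokens:
--             feature[w] = 1
--         else:
--             feature[w] = 0
--     return feature
-- ===== SOURCE B (Python) =====
-- def document_features(data, word_bag):
--     feature = dict.fromkeys(word_bag, 0)
--     for t in data:
--         if t in feature:
--             feature[t] = 1
--     return feature
-- ===== Notes on version B (the rewrite author's own statement) =====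
-- stated objective: idiomatic
-- what changed: B builds the dict once with dict.fromkeys(word_bag, 0) and then scans data marking present keys to 1, instead of building a set of data and testing each word_bag entry against it.
import Mathlib
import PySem

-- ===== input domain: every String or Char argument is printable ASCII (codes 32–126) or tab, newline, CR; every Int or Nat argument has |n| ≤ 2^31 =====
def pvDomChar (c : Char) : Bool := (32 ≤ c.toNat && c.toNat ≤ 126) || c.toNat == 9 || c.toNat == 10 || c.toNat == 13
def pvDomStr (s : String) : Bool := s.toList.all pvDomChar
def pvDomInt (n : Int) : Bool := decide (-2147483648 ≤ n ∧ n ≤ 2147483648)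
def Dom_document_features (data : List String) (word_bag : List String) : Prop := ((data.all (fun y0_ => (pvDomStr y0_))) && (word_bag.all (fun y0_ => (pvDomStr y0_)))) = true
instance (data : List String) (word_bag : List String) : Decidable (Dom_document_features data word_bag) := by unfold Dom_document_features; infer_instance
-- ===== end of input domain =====

-- B builds the result dict directly (fromkeys to 0, then one pass over data marking present keys 1)
-- instead of A's separate tokens set scanned per word_bag entry; same cost, more idiomatic.

-- ===== PORT A =====
def document_features (data : List String) (word_bag : List String) : List (String × Int) :=
  let tokens : PySem.Set String := PySem.Set.ofList data
  (word_bag.foldl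
    (fun feature w =>
      if w ∈ tokens then feature.insert w 1 else feature.insert w 0)
    PySem.Dict.empty).items

-- ===== PORT B =====
def document_features_alt (data : List String) (word_bag : List String) : List (String × Int) :=
  let feature : PySem.Dict String Int :=
    word_bag.foldl (fun d w => d.insert w 0) PySem.Dict.empty   -- dict.fromkeys(word_bag, 0)
  (data.foldl
    (fun d t => if d.contains t then d.insert t 1 else d)
    feature).items

-- ===== PRECONDITION & SPEC =====
def Spec_document_features (data : List String) (word_bag : List String) (out : List (String × Int)) : Prop := out = document_features_alt data word_bag
instance (data : List String) (word_bag : List String) (out : List (String × Int)) : Decidable (Spec_document_features data word_bag out) := by unfold Spec_document_features; infer_instance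

-- ===== CLAIM (what is proved, stated in full; the proofs are below) =====
def Claim_equal_document_features : Prop := ∀ (data : List String) (word_bag : List String), Dom_document_features data word_bag → Spec_document_features data word_bag (document_features data word_bag)

-- ===== LEMMAS AND PROOFS =====

lemma dict_eq_of_items {d e : PySem.Dict String Int} (h : d.items = e.items) : d = e := by
  cases d; cases e; simpa using h

-- inserting (w, v) into a dict whose entries are (k, g k) for the keys K
lemma insert_mapped (K : List String) (g : String → Int) (w : String) (v : Int) :
    (PySem.Dict.mk (K.map fun k => (k, g k))).insert w v
      = PySem.Dict.mk ((if w ∈ K then K else K ++ [w]).map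
          (fun k => (k, if k = w then v else g k))) := by
  apply dict_eq_of_items
  rw [PySem.Dict.items_insert]
  have hc : (PySem.Dict.mk (K.map fun k => (k, g k))).contains w = decide (w ∈ K) := by
    rw [PySem.Dict.contains_eq_decide_mem_keys, PySem.Dict.keys_mk]
    simp
  rw [hc]
  by_cases hw : w ∈ K
  · simp only [hw, decide_true, if_true]
    show (K.map fun k => (k, g k)).map _ = _
    rw [List.map_map]
    apply List.map_congr_left
    intro k _
    by_cases hkw : k = w
    · subst hkw; simp
    · simp [hkw]
  · simp only [hw, decide_false, if_false]
    show K.map (fun k => (k, g k)) ++ [(w, v)] = _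
    rw [List.map_append]
    congr 1
    · apply List.map_congr_left
      intro k hk
      have hkw : k ≠ w := fun h => hw (h ▸ hk)
      simp [hkw]
    · simp

-- the key list produced by successive "insert if new" steps
def updKeys : List String → List String → List String
  | K, [] => K
  | K, w :: l => updKeys (if w ∈ K then K else K ++ [w]) l

-- a fold of inserts whose value depends only on the key
lemma fold_insert_fun (f : String → Int) (wb : List String) : ∀ K : List String,
    List.foldl (fun d w => d.insert w (f w))
        (PySem.Dict.mk (K.map fun k => (k, f k))) wb
      = PySem.Dict.mk ((updKeys K wb).map (fun k => (k, f k))) := by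
  induction wb with
  | nil => intro K; simp [updKeys]
  | cons w wb ih =>
    intro K
    rw [List.foldl_cons, insert_mapped]
    have hmap : ((if w ∈ K then K else K ++ [w]).map (fun k => (k, if k = w then f w else f k)))
        = ((if w ∈ K then K else K ++ [w]).map (fun k => (k, f k))) := by
      apply List.map_congr_left
      intro k _
      by_cases h : k = w
      · subst h; simp
      · simp [h]
    rw [hmap, ih]
    simp [updKeys]

-- B's marking pass: overwrite with 1 exactly the keys occurring in l
lemma fold_mark (l : List String) : ∀ (K : List String) (g : String → Int),
    List.foldl (fun d t => if d.contains t then d.insert t 1 else d)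
        (PySem.Dict.mk (K.map fun k => (k, g k))) l
      = PySem.Dict.mk (K.map (fun k => (k, if k ∈ l then 1 else g k))) := by
  induction l with
  | nil => intro K g; simp
  | cons t l ih =>
    intro K g
    rw [List.foldl_cons]
    have hc : (PySem.Dict.mk (K.map fun k => (k, g k))).contains t = decide (t ∈ K) := by
      rw [PySem.Dict.contains_eq_decide_mem_keys, PySem.Dict.keys_mk]
      simp
    by_cases ht : t ∈ K
    · rw [hc]
      simp only [ht, decide_true, if_true]
      rw [insert_mapped]
      simp only [ht, if_true]
      rw [ih K (fun k => if k = t then 1 else g k)]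
      congr 1
      apply List.map_congr_left
      intro k _
      by_cases h1 : k ∈ l
      · simp [h1]
      · by_cases h2 : k = t
        · subst h2; simp [h1]
        · simp [List.mem_cons, h1, h2]
    · rw [hc]
      simp only [ht, decide_false, Bool.false_eq_true, if_false]
      rw [ih K g]
      congr 1
      apply List.map_congr_left
      intro k hk
      have h2 : k ≠ t := fun h => ht (h ▸ hk)
      simp [List.mem_cons, h2]

-- ===== VERDICT (by name: the statement is the Claim_ definition above) =====
theorem document_features_spec : Claim_equal_document_features := by
  intro data word_bag _
  show document_features data word_bag = document_features_alt data word_bag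
  simp only [document_features, document_features_alt]
  have hstep : (fun (d : PySem.Dict String Int) w =>
        if w ∈ PySem.Set.ofList data then d.insert w 1 else d.insert w 0)
      = (fun d w => d.insert w (if w ∈ data then 1 else 0)) := by
    funext d w
    by_cases h : w ∈ data
    · rw [if_pos ((PySem.Set.mem_ofList data w).2 h), if_pos h]
    · rw [if_neg (fun hm => h ((PySem.Set.mem_ofList data w).1 hm)), if_neg h]
  rw [hstep]
  have he : (PySem.Dict.empty : PySem.Dict String Int)
      = PySem.Dict.mk (([] : List String).map fun k => (k, if k ∈ data then (1 : Int) else 0)) := rfl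
  have he0 : (PySem.Dict.empty : PySem.Dict String Int)
      = PySem.Dict.mk (([] : List String).map fun k => (k, (0 : Int))) := rfl
  conv_lhs => rw [he]
  conv_rhs => rw [he0]
  rw [fold_insert_fun (fun w => if w ∈ data then (1 : Int) else 0) word_bag [],
      fold_insert_fun (fun _ => (0 : Int)) word_bag [],
      fold_mark data (updKeys [] word_bag) (fun _ => (0 : Int))]
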